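-- pv_equiv track=rewrite | github.com/Zombiesama18/Leetcode_Python | Leetcode/Leetcode_5959. 使数组 K 递增的最少操作次数.py | kIncreasing
-- ===== SOURCE A (Python) =====
-- from typing import List
-- import bisect
--
-- def kIncreasing(arr: List[int], k: int) -> int:
--     result = 0
--     length = len(arr)
--     for i in range(k):
--         increase_array = []
--         j, temp_length = i, 0
--         while j < length:
--             temp_length += 1
--             position = bisect.bisect_right(increase_array, arr[j])
--             if position == len(increase_array):
--                 increase_array.append(arr[j])
--             else:
--                 increase_array[position] = arr[j]
--             j += k
--         result += temp_length - len(increase_array)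
--     return result
-- ===== SOURCE B (Python) =====
-- from typing import List
--
--
-- def kIncreasing(arr: List[int], k: int) -> int:
--     result = 0
--     n = len(arr)
--     for i in range(k):
--         elems = [arr[j] for j in range(i, n, k)]
--         dp = []
--         for x in elems:
--             best = 0
--             for p, d in zip(elems, dp):
--                 if p <= x and d > best:
--                     best = d
--             dp.append(best + 1)
--         result += len(elems) - (max(dp) if dp else 0)
--     return result
-- ===== Notes on version B (the rewrite author's own statement) =====
-- stated objective: alternative
-- what changed: Per stride, A computes the longest non-decreasing subsequence by patience sorting (binary-search tail array via bisect_right, replace-or-append); B computes it by the classic quadratic DP (dp[j] = 1 + max dp over earlier stride elements <= elem[j]) and subtracts the max dp from the stride length.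
import Mathlib
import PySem

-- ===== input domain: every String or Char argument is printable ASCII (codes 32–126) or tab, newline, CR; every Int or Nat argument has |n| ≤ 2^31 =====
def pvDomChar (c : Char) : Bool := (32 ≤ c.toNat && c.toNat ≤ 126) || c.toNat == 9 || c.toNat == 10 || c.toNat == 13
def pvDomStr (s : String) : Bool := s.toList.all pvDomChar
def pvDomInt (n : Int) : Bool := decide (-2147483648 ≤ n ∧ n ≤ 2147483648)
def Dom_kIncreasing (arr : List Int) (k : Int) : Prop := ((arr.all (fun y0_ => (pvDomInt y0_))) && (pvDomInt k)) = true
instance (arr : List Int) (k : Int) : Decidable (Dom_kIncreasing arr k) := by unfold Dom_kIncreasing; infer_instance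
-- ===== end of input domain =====

-- B replaces A's patience-sorting (bisect tail array) LIS per stride by a quadratic
-- longest-non-decreasing-subsequence DP per stride (objective: alternative algorithm, same results).

-- ===== PORT A =====
-- the `while j < length` loop; `0 < k` in the guard is only a termination guard:
-- the loop is only ever entered with k ≥ 1 (i ∈ range(k)), where it is exactly Python's condition
def innerA (arr : List Int) (length k : Int) (j : Int) (ia : List Int) (tl : Int) : List Int × Int :=
  if _h : j < length ∧ 0 < k then
    let x := PySem.List.pyGetD arr j 0   -- arr[j]; j is always in range here
    let tl' := tl + 1
    let position := PySem.List.bisectRight ia x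
    let ia' := if position = ia.length then ia ++ [x] else ia.set position x
    innerA arr length k (j + k) ia' tl'
  else (ia, tl)
termination_by (length - j).toNat
decreasing_by omega

def kIncreasing (arr : List Int) (k : Int) : Int :=
  let length : Int := arr.length
  (PySem.List.pyRange 0 k 1).foldl
    (fun result i =>
      let st := innerA arr length k i [] 0
      result + (st.2 - (st.1.length : Int)))
    0

-- ===== PORT B =====
-- best = max(d for p, d in zip(elems, dp) if p <= x) with default 0
def bestB (pairs : List (Int × Int)) (x : Int) : Int :=
  pairs.foldl (fun best pd => if pd.1 ≤ x ∧ best < pd.2 then pd.2 else best) 0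

-- dp list of LNDS-ending-here lengths
def dpB (elems : List Int) : List Int :=
  elems.foldl (fun dp x => dp ++ [bestB (elems.zip dp) x + 1]) []

def kIncreasing_alt (arr : List Int) (k : Int) : Int :=
  let n : Int := arr.length
  (PySem.List.pyRange 0 k 1).foldl
    (fun result i =>
      let elems := (PySem.List.pyRange i n k).map (fun j => PySem.List.pyGetD arr j 0)
      let dp := dpB elems
      result + ((elems.length : Int) -
        (match PySem.List.max? dp (fun y => y) with | some m => m | none => 0)))
    0

-- ===== PRECONDITION & SPEC =====
def Spec_kIncreasing (arr : List Int) (k : Int) (out : Int) : Prop := out = kIncreasing_alt arr k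
instance (arr : List Int) (k : Int) (out : Int) : Decidable (Spec_kIncreasing arr k out) := by unfold Spec_kIncreasing; infer_instance

-- ===== CLAIM (what is proved, stated in full; the proofs are below) =====
def Claim_equal_kIncreasing : Prop := ∀ (arr : List Int) (k : Int), Dom_kIncreasing arr k → Spec_kIncreasing arr k (kIncreasing arr k)

-- ===== LEMMAS AND PROOFS =====

def stepA (t : List Int) (x : Int) : List Int :=
  let pos := PySem.List.bisectRight t x
  if pos = t.length then t ++ [x] else t.set pos x

def dpPairs (r : List Int) (ps : List (Int × Int)) : List (Int × Int) :=
  r.foldl (fun ps x => ps ++ [(x, bestB ps x + 1)]) ps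

-- the invariant tying A's tail array t to B's (element, dp-value) pairs: t is sorted,
-- every dp value lies in [1, |t|], and t[ℓ] is the least element ending a dp value ≥ ℓ+1
def InvAB (ps : List (Int × Int)) (t : List Int) : Prop :=
  t.Pairwise (· ≤ ·) ∧
  (∀ pd ∈ ps, 1 ≤ pd.2 ∧ pd.2 ≤ (t.length : Int)) ∧
  (∀ ℓ : Nat, (hℓ : ℓ < t.length) →
    (∃ pd ∈ ps, (ℓ : Int) + 1 ≤ pd.2 ∧ pd.1 = t[ℓ]) ∧
    (∀ pd ∈ ps, (ℓ : Int) + 1 ≤ pd.2 → t[ℓ] ≤ pd.1))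

lemma pyRange_pos_cons (a b s : Int) (hs : 0 < s) (hab : a < b) :
    PySem.List.pyRange a b s = a :: PySem.List.pyRange (a + s) b s := by
  rw [PySem.List.pyRange_of_pos a b hs, PySem.List.pyRange_of_pos (a + s) b hs]
  have hcnt : ((b - a + s - 1) / s).toNat =
      (if a + s < b then ((b - (a + s) + s - 1) / s).toNat else 0) + 1 := by
    by_cases h2 : a + s < b
    · rw [if_pos h2]
      have : b - a + s - 1 = (b - (a + s) + s - 1) + 1 * s := by ring
      rw [this, Int.add_mul_ediv_right _ _ (by omega : s ≠ 0)]
      have hpos : 0 ≤ (b - (a + s) + s - 1) / s := by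
        apply Int.ediv_nonneg <;> omega
      omega
    · rw [if_neg h2]
      have h1 : (b - a + s - 1) / s = 1 := by
        have : b - a + s - 1 = (b - a - 1) + 1 * s := by ring
        rw [this, Int.add_mul_ediv_right _ _ (by omega : s ≠ 0)]
        have : (b - a - 1) / s = 0 := Int.ediv_eq_zero_of_lt (by omega) (by omega)
        omega
      rw [h1]; rfl
  rw [if_pos hab, hcnt, List.range_succ_eq_map]
  simp only [List.map_cons, List.map_map]
  refine congrArg₂ _ (by simp) (List.map_congr_left ?_)
  intro m _
  simp [Function.comp, Nat.succ_eq_add_one]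
  ring

lemma pyRange_pos_nil (a b s : Int) (hs : 0 < s) (hab : b ≤ a) :
    PySem.List.pyRange a b s = [] := by
  rw [PySem.List.pyRange_of_pos a b hs, if_neg (by omega)]
  simp

lemma zip_proj (ps : List (Int × Int)) (r : List Int) :
    (ps.map Prod.fst ++ r).zip (ps.map Prod.snd) = ps := by
  induction ps with
  | nil => simp
  | cons p t ih => simp [ih]

lemma bestB_go (x : Int) (ps : List (Int × Int)) : ∀ (b0 : Int),
    b0 ≤ ps.foldl (fun best pd => if pd.1 ≤ x ∧ best < pd.2 then pd.2 else best) b0 ∧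
    (ps.foldl (fun best pd => if pd.1 ≤ x ∧ best < pd.2 then pd.2 else best) b0 = b0 ∨
      ∃ pd ∈ ps, pd.1 ≤ x ∧ pd.2 = ps.foldl (fun best pd => if pd.1 ≤ x ∧ best < pd.2 then pd.2 else best) b0) ∧
    (∀ pd ∈ ps, pd.1 ≤ x → pd.2 ≤ ps.foldl (fun best pd => if pd.1 ≤ x ∧ best < pd.2 then pd.2 else best) b0) := by
  induction ps with
  | nil => intro b0; simp
  | cons p t ih =>
    intro b0
    simp only [List.foldl_cons]
    by_cases hc : p.1 ≤ x ∧ b0 < p.2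
    · rw [if_pos hc]
      rcases ih p.2 with ⟨h1, h2, h3⟩
      refine ⟨by omega, ?_, ?_⟩
      · right
        rcases h2 with h2 | ⟨pd, hm, hle, heq⟩
        · exact ⟨p, by simp, hc.1, by omega⟩
        · exact ⟨pd, by simp [hm], hle, heq⟩
      · intro pd hm hle
        rcases List.mem_cons.mp hm with rfl | hm'
        · omega
        · exact h3 pd hm' hle
    · rw [if_neg hc]
      rcases ih b0 with ⟨h1, h2, h3⟩
      refine ⟨h1, ?_, ?_⟩
      · rcases h2 with h2 | ⟨pd, hm, hle, heq⟩
        · left; exact h2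
        · right; exact ⟨pd, by simp [hm], hle, heq⟩
      · intro pd hm hle
        rcases List.mem_cons.mp hm with rfl | hm'
        · have hb : pd.2 ≤ b0 := by by_contra hb; exact hc ⟨hle, by omega⟩
          omega
        · exact h3 pd hm' hle

lemma bestB_spec (x : Int) (ps : List (Int × Int)) :
    0 ≤ bestB ps x ∧
    (bestB ps x = 0 ∨ ∃ pd ∈ ps, pd.1 ≤ x ∧ pd.2 = bestB ps x) ∧
    (∀ pd ∈ ps, pd.1 ≤ x → pd.2 ≤ bestB ps x) := bestB_go x ps 0

lemma dpB_go : ∀ (r : List Int) (ps : List (Int × Int)) (elems : List Int),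
    elems = ps.map Prod.fst ++ r →
    r.foldl (fun dp x => dp ++ [bestB (elems.zip dp) x + 1]) (ps.map Prod.snd) =
      (dpPairs r ps).map Prod.snd := by
  intro r
  induction r with
  | nil => intro ps elems _; simp [dpPairs]
  | cons y r' ih =>
    intro ps elems helems
    subst helems
    simp only [List.foldl_cons, dpPairs]
    rw [zip_proj]
    have step : ps.map Prod.snd ++ [bestB ps y + 1] =
        (ps ++ [(y, bestB ps y + 1)]).map Prod.snd := by simp
    rw [step]
    have := ih (ps ++ [(y, bestB ps y + 1)])
      (List.map Prod.fst ps ++ y :: r') (by simp)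
    simpa [dpPairs] using this

lemma dpB_eq (s : List Int) : dpB s = (dpPairs s []).map Prod.snd := by
  have := dpB_go s [] s (by simp)
  simpa [dpB] using this

lemma length_dpPairs : ∀ (r : List Int) (ps : List (Int × Int)),
    (dpPairs r ps).length = ps.length + r.length := by
  intro r
  induction r with
  | nil => intro ps; simp [dpPairs]
  | cons y r' ih =>
    intro ps
    simp only [dpPairs, List.foldl_cons]
    have := ih (ps ++ [(y, bestB ps y + 1)])
    simp [dpPairs] at this
    simp [this]; omega

lemma inv_step (ps : List (Int × Int)) (t : List Int) (x : Int) (h : InvAB ps t) :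
    InvAB (ps ++ [(x, bestB ps x + 1)]) (stepA t x) := by
  obtain ⟨hsort, hbnd, hlev⟩ := h
  obtain ⟨hposle, hlt_le, hge_gt⟩ := PySem.List.bisectRight_spec t x hsort
  obtain ⟨hb0, hbw, hbub⟩ := bestB_spec x ps
  set pos := PySem.List.bisectRight t x with hposdef
  set b := bestB ps x with hbdef
  have hsortg := List.pairwise_iff_getElem.mp hsort
  -- b = pos
  have h1 : (pos : Int) ≤ b := by
    rcases Nat.eq_zero_or_pos pos with hz | hpz
    · omega
    · have hidx : pos - 1 < t.length := by omega
      have hle : t[pos-1] ≤ x := hlt_le (pos-1) hidx (by omega)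
      obtain ⟨⟨pd, hm, hpd2, hpd1⟩, -⟩ := hlev (pos-1) hidx
      have := hbub pd hm (by rw [hpd1]; exact hle)
      omega
  have h2 : b ≤ (pos : Int) := by
    rcases hbw with h0 | ⟨pd, hm, hpx, hpd2⟩
    · omega
    · have hb1 : 1 ≤ b := by have := (hbnd pd hm).1; omega
      have hble : b ≤ (t.length : Int) := by have := (hbnd pd hm).2; omega
      have hℓlt : (b - 1).toNat < t.length := by omega
      by_contra hcon
      have hxlt := hge_gt (b - 1).toNat hℓlt (by omega)
      obtain ⟨-, hlb⟩ := hlev (b - 1).toNat hℓlt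
      have := hlb pd hm (by omega)
      omega
  have hbp : b = (pos : Int) := le_antisymm h2 h1
  unfold stepA
  rw [← hposdef]
  by_cases hcase : pos = t.length
  · -- append
    rw [if_pos hcase]
    have hallle : ∀ i (hi : i < t.length), t[i] ≤ x := fun i hi => hlt_le i hi (by omega)
    refine ⟨?_, ?_, ?_⟩
    · refine List.pairwise_iff_getElem.mpr ?_
      intro i j hi hj hij
      simp only [List.length_append, List.length_cons, List.length_nil] at hj
      by_cases hjl : j < t.length
      · rw [List.getElem_append_left (by omega), List.getElem_append_left hjl]
        exact hsortg i j (by omega) hjl hij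
      · have hj' : j = t.length := by omega
        subst hj'
        have hx : (t ++ [x])[t.length]'(by simp) = x := by simp
        rw [List.getElem_append_left (by omega), hx]
        exact hallle i (by omega)
    · intro pd hm
      rcases List.mem_append.mp hm with hm' | hm'
      · have := hbnd pd hm'; simp only [List.length_append]; constructor <;> [omega; (push_cast; omega)]
      · simp only [List.mem_singleton] at hm'
        subst hm'
        simp only [List.length_append, List.length_cons, List.length_nil]
        push_cast
        omega
    · intro ℓ hℓ
      simp only [List.length_append, List.length_cons, List.length_nil] at hℓ
      by_cases hℓl : ℓ < t.length
      · have hget : (t ++ [x])[ℓ]'(by simp; omega) = t[ℓ] := List.getElem_append_left hℓl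
        obtain ⟨⟨pd, hm, hpd2, hpd1⟩, hlb⟩ := hlev ℓ hℓl
        refine ⟨⟨pd, List.mem_append.mpr (Or.inl hm), hpd2, by rw [hget, hpd1]⟩, ?_⟩
        intro pd' hm' hle'
        rcases List.mem_append.mp hm' with hm'' | hm''
        · rw [hget]; exact hlb pd' hm'' hle'
        · simp only [List.mem_singleton] at hm''
          subst hm''
          rw [hget]
          exact hallle ℓ hℓl
      · have hℓ' : ℓ = t.length := by omega
        subst hℓ'
        have hget : (t ++ [x])[t.length]'(by simp) = x := by simp
        refine ⟨⟨(x, b + 1), List.mem_append.mpr (Or.inr (by simp)), by simp; omega, by rw [hget]⟩, ?_⟩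
        intro pd' hm' hle'
        rcases List.mem_append.mp hm' with hm'' | hm''
        · have := (hbnd pd' hm'').2; omega
        · simp only [List.mem_singleton] at hm''
          subst hm''
          rw [hget]
  · -- set
    rw [if_neg hcase]
    have hposlt : pos < t.length := by omega
    have hxlt : x < t[pos] := hge_gt pos hposlt le_rfl
    refine ⟨?_, ?_, ?_⟩
    · refine List.pairwise_iff_getElem.mpr ?_
      intro i j hi hj hij
      simp only [List.length_set] at hi hj
      rw [List.getElem_set _, List.getElem_set _]
      by_cases hip : pos = i
      · subst hip
        rw [if_pos rfl, if_neg (by omega)]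
        exact le_of_lt (hge_gt j hj (by omega))
      · rw [if_neg hip]
        by_cases hjp : pos = j
        · subst hjp
          rw [if_pos rfl]
          exact hlt_le i hi (by omega)
        · rw [if_neg hjp]
          exact hsortg i j hi hj hij
    · intro pd hm
      simp only [List.length_set]
      rcases List.mem_append.mp hm with hm' | hm'
      · exact hbnd pd hm'
      · simp only [List.mem_singleton] at hm'
        subst hm'
        simp only
        omega
    · intro ℓ hℓ
      simp only [List.length_set] at hℓ
      have hget : (t.set pos x)[ℓ]'(by simp [hℓ]) = if pos = ℓ then x else t[ℓ] := List.getElem_set _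
      by_cases hℓp : ℓ < pos
      · rw [hget, if_neg (by omega)]
        obtain ⟨⟨pd, hm, hpd2, hpd1⟩, hlb⟩ := hlev ℓ hℓ
        refine ⟨⟨pd, List.mem_append.mpr (Or.inl hm), hpd2, hpd1⟩, ?_⟩
        intro pd' hm' hle'
        rcases List.mem_append.mp hm' with hm'' | hm''
        · exact hlb pd' hm'' hle'
        · simp only [List.mem_singleton] at hm''
          subst hm''
          exact hlt_le ℓ hℓ (by omega)
      · by_cases hℓe : ℓ = pos
        · subst hℓe
          rw [hget, if_pos rfl]
          refine ⟨⟨(x, b + 1), List.mem_append.mpr (Or.inr (by simp)), by simp; omega, rfl⟩, ?_⟩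
          intro pd' hm' hle'
          rcases List.mem_append.mp hm' with hm'' | hm''
          · obtain ⟨-, hlb⟩ := hlev pos hℓ
            have := hlb pd' hm'' hle'
            omega
          · simp only [List.mem_singleton] at hm''
            subst hm''
            simp
        · rw [hget, if_neg (by omega)]
          obtain ⟨⟨pd, hm, hpd2, hpd1⟩, hlb⟩ := hlev ℓ hℓ
          refine ⟨⟨pd, List.mem_append.mpr (Or.inl hm), hpd2, hpd1⟩, ?_⟩
          intro pd' hm' hle'
          rcases List.mem_append.mp hm' with hm'' | hm''
          · exact hlb pd' hm'' hle'
          · simp only [List.mem_singleton] at hm''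
            subst hm''
            simp only at hle'
            omega

lemma inv_fold : ∀ (r : List Int) (ps : List (Int × Int)) (t : List Int), InvAB ps t →
    InvAB (dpPairs r ps) (r.foldl stepA t) := by
  intro r
  induction r with
  | nil => intro ps t h; simpa [dpPairs] using h
  | cons y r' ih =>
    intro ps t h
    simp only [dpPairs, List.foldl_cons]
    exact (by simpa [dpPairs] using ih (ps ++ [(y, bestB ps y + 1)]) (stepA t y) (inv_step ps t y h))

lemma core (s : List Int) :
    ((s.foldl stepA []).length : Int) =
      (match PySem.List.max? (dpB s) (fun y => y) with | some m => m | none => 0) := by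
  have hinv : InvAB (dpPairs s []) (s.foldl stepA []) := by
    apply inv_fold
    refine ⟨List.Pairwise.nil, by simp, by simp⟩
  obtain ⟨-, hbnd, hlev⟩ := hinv
  set t := s.foldl stepA [] with ht
  set ps := dpPairs s [] with hps
  rw [dpB_eq, ← hps]
  cases hs : s with
  | nil =>
    subst hs
    simp [ht, hps, dpPairs, PySem.List.max?]
  | cons y s' =>
    have hlen : ps.length = s.length := by
      rw [hps, length_dpPairs]; simp
    have hpsne : ps ≠ [] := by
      intro hnil
      rw [hnil, hs] at hlen
      simp at hlen
    have hdpne : ps.map Prod.snd ≠ [] := by simpa using hpsne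
    cases hm : PySem.List.max? (ps.map Prod.snd) (fun y => y) with
    | none => exact absurd ((PySem.List.max?_eq_none_iff _ _).mp hm) hdpne
    | some m =>
    have hmmem := PySem.List.max?_mem hm
    have hmmax := PySem.List.max?_isMax hm
    obtain ⟨pd, hpdmem, hpdsnd⟩ := List.mem_map.mp hmmem
    -- m ≤ len
    have hmle : m ≤ (t.length : Int) := hpdsnd ▸ (hbnd pd hpdmem).2
    -- len ≤ m
    have hlen0 : t.length ≠ 0 := by
      intro h0
      have h1 := (hbnd pd hpdmem).1
      have h2 := (hbnd pd hpdmem).2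
      rw [h0] at h2
      simp at h2
      omega
    obtain ⟨⟨pd', hm', hpd2', -⟩, -⟩ := hlev (t.length - 1) (by omega)
    have : pd'.2 ≤ m := hmmax pd'.2 (List.mem_map.mpr ⟨pd', hm', rfl⟩)
    show (t.length : Int) = m
    omega


lemma innerA_eq (arr : List Int) (len k : Int) (hk : 0 < k) :
    ∀ (n : Nat) (j : Int) (ia : List Int) (tl : Int), (len - j).toNat = n →
    innerA arr len k j ia tl =
      (((PySem.List.pyRange j len k).map (fun m => PySem.List.pyGetD arr m 0)).foldl stepA ia,
       tl + ((PySem.List.pyRange j len k).length : Int)) := by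
  intro n
  induction n using Nat.strong_induction_on with
  | _ n ih =>
    intro j ia tl hn
    by_cases hj : j < len
    · rw [innerA, dif_pos ⟨hj, hk⟩]
      rw [pyRange_pos_cons j len k hk hj]
      have := ih ((len - (j + k)).toNat) (by omega) (j + k)
        (let x := PySem.List.pyGetD arr j 0
         let position := PySem.List.bisectRight ia x
         if position = ia.length then ia ++ [x] else ia.set position x)
        (tl + 1) rfl
      rw [this]
      simp only [List.map_cons, List.foldl_cons, List.length_cons, stepA]
      rw [Prod.mk.injEq]
      exact ⟨rfl, by push_cast; ring⟩
    · rw [innerA, dif_neg (by omega)]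
      rw [pyRange_pos_nil j len k hk (by omega)]
      simp

-- ===== VERDICT (by name: the statement is the Claim_ definition above) =====
theorem kIncreasing_spec : Claim_equal_kIncreasing := by
  intro arr k _
  unfold Spec_kIncreasing kIncreasing kIncreasing_alt
  by_cases hk : 0 < k
  · have hfun : ∀ (result i : Int),
        (result + ((innerA arr (arr.length : Int) k i [] 0).2 -
          ((innerA arr (arr.length : Int) k i [] 0).1.length : Int))) =
        (result + ((((PySem.List.pyRange i (arr.length : Int) k).map
              (fun j => PySem.List.pyGetD arr j 0)).length : Int) -
          (match PySem.List.max? (dpB ((PySem.List.pyRange i (arr.length : Int) k).map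
              (fun j => PySem.List.pyGetD arr j 0))) (fun y => y) with
            | some m => m | none => 0))) := by
      intro result i
      rw [innerA_eq arr (arr.length : Int) k hk ((arr.length : Int) - i).toNat i [] 0 rfl]
      rw [← core, List.length_map]
      simp
    simp only [hfun]
  · have h0 : PySem.List.pyRange 0 k 1 = [] := by
      apply PySem.List.pyRange_one_eq_nil; omega
    simp [h0]
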